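-- pv_equiv track=rewrite | github.com/mvandepanne/seamless | spyder/__init__.py | is_valid_spydertype2
-- ===== SOURCE A (Python) =====
-- max_array_depth = 2
--
-- reserved_types = (
--   "Spyder",
--   "Type",
--   "Object",
--   "Delete",
--   "Include",
--   "None",
--   "True",
--   "False",
-- )
--
-- reserved_endings = (
--   "Error",
--   "Exit",
--   "Exception",
-- )
--
-- def is_valid_spydertype(type_name):
--     """Tests if a string is a valid Spyder type"""
--     if not type_name.replace("_", "x").isalnum():
--         return False
--
--     if not type_name[0].isupper():
--         return False
--
--     if len(type_name) > 1 and type_name == type_name.upper():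
--         return False
--
--     if type_name.endswith("Array") or type_name in reserved_types:
--         return False
--
--     for ending in reserved_endings:
--         if type_name.endswith(ending):
--             return False
--     return True
--
-- def is_valid_spydertype2(type_name):
--     """Tests if a string is a valid Spyder type. Endings with Array are also allowed
--     """
--     array_depth = 0
--
--     while type_name.endswith("Array"):
--         type_name = type_name[:-len("Array")]
--         array_depth += 1
--
--     if array_depth > max_array_depth: # Why 3?
--         return False
--
--     return is_valid_spydertype(type_name)
-- ===== SOURCE B (Python) =====
-- max_array_depth = 2
--
-- reserved_types = (
--   "Spyder",
--   "Type",
--   "Object",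
--   "Delete",
--   "Include",
--   "None",
--   "True",
--   "False",
-- )
--
-- reserved_endings = (
--   "Error",
--   "Exit",
--   "Exception",
-- )
--
-- def is_valid_spydertype2(type_name):
--     """Tests if a string is a valid Spyder type. Endings with Array are also allowed
--     """
--     # three or more trailing "Array" chunks exceed the maximal array depth of 2
--     if type_name.endswith("ArrayArrayArray"):
--         return False
--     base = type_name
--     if base.endswith("Array"):
--         base = base[:-5]
--     if base.endswith("Array"):
--         base = base[:-5]
--     if len(base) == 0:
--         return False
--     if any(not (c.isalnum() or c == "_") for c in base):
--         return False
--     if not base[0].isupper():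
--         return False
--     if len(base) > 1 and not any(c.islower() for c in base):
--         return False
--     if base in reserved_types:
--         return False
--     return not any(base.endswith(e) for e in reserved_endings)
-- ===== Notes on version B (the rewrite author's own statement) =====
-- stated objective: simpler
-- what changed: B is one straight-line function: instead of an accumulating while-loop plus a helper, it rejects a triple 'Array' suffix up front, strips at most two 'Array' chunks, and validates the base with direct per-character checks (any/all over characters) in place of replace('_','x').isalnum(), the string==string.upper() comparison and the for-loop over reserved endings.
import Mathlib
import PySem

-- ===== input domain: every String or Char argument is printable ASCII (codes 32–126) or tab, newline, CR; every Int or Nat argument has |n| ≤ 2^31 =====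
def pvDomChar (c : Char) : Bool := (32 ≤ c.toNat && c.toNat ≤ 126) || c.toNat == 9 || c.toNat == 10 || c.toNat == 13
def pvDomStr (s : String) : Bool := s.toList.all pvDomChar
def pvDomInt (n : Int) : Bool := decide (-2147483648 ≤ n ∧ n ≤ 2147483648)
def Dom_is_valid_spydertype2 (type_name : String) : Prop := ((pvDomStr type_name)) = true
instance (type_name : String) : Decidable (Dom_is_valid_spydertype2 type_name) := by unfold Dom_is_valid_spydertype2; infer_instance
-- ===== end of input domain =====

-- B replaces A's accumulating while-loop plus helper function by one straight-line validation:
-- a triple-"Array"-suffix rejection, at most two strips, and per-character checks; objective: simpler.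

-- ===== PORT A =====
def pvReservedTypes : List String :=
  ["Spyder", "Type", "Object", "Delete", "Include", "None", "True", "False"]

def pvReservedEndings : List String := ["Error", "Exit", "Exception"]

-- the 'for ending in reserved_endings: if type_name.endswith(ending): return False' loop
def pvEndingsLoop (t : String) : List String → Bool
  | [] => true
  | e :: rest => if PySem.Str.endswith t e then false else pvEndingsLoop t rest

-- port of the helper is_valid_spydertype
def pv_is_valid_spydertype (type_name : String) : Bool :=
  if !(PySem.Str.strIsalnum (PySem.Str.replace type_name "_" "x")) then false
  else
    match PySem.Str.pyGet? type_name 0 with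
    | none => false   -- unreachable: the isalnum guard above already rejected the empty string
    | some c =>
      if !(PySem.Chars.isupper c) then false
      else if PySem.Str.len type_name > 1 && type_name == PySem.Str.upper type_name then false
      else if PySem.Str.endswith type_name "Array" || pvReservedTypes.contains type_name then false
      else pvEndingsLoop type_name pvReservedEndings

-- the 'while type_name.endswith("Array")' loop, accumulating array_depth
def pvStripLoop (s : String) (d : Nat) : String × Nat :=
  if h : PySem.Str.endswith s "Array" then
    pvStripLoop (PySem.Str.slice s none (some (-5))) (d + 1)
  else (s, d)
termination_by s.toList.length
decreasing_by
  have hs : ("Array" : String).toList <:+ s.toList :=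
    (PySem.Chars.endswith_iff _ _).mp (by rw [← PySem.Str.endswith_eq]; exact h)
  have h5 : 5 ≤ s.toList.length := by simpa using hs.length_le
  rw [PySem.Str.toList_slice, PySem.Chars.slice_eq_listSlice,
      PySem.List.slice_to_neg_ofNat s.toList 5 (by omega), List.length_take]
  omega

def is_valid_spydertype2 (type_name : String) : Bool :=
  if (pvStripLoop type_name 0).2 > 2 then false
  else pv_is_valid_spydertype (pvStripLoop type_name 0).1

-- ===== PORT B =====
def is_valid_spydertype2_alt (type_name : String) : Bool :=
  if PySem.Str.endswith type_name "ArrayArrayArray" then false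
  else
    let base1 := if PySem.Str.endswith type_name "Array"
                 then PySem.Str.slice type_name none (some (-5)) else type_name
    let base := if PySem.Str.endswith base1 "Array"
                then PySem.Str.slice base1 none (some (-5)) else base1
    if PySem.Str.len base = 0 then false
    else if base.toList.any (fun c => !(PySem.Chars.isalnum c || c == '_')) then false
    else
      match PySem.Str.pyGet? base 0 with
      | none => false   -- unreachable: base is nonempty here
      | some c =>
        if !(PySem.Chars.isupper c) then false
        else if PySem.Str.len base > 1 && !(base.toList.any PySem.Chars.islower) then false
        else if pvReservedTypes.contains base then false
        else !(pvReservedEndings.any (fun e => PySem.Str.endswith base e))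

-- ===== PRECONDITION & SPEC =====
def Spec_is_valid_spydertype2 (type_name : String) (out : Bool) : Prop := out = is_valid_spydertype2_alt type_name
instance (type_name : String) (out : Bool) : Decidable (Spec_is_valid_spydertype2 type_name out) := by unfold Spec_is_valid_spydertype2; infer_instance

-- ===== CLAIM (what is proved, stated in full; the proofs are below) =====
def Claim_equal_is_valid_spydertype2 : Prop := ∀ (type_name : String), Dom_is_valid_spydertype2 type_name → Spec_is_valid_spydertype2 type_name (is_valid_spydertype2 type_name)

-- ===== LEMMAS AND PROOFS =====

-- replacing "_" by "x" is a per-character map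
theorem pv_replace_go_map (l acc : List Char) (fuel : Nat) (h : l.length ≤ fuel) :
    PySem.Chars.replace.go ['_'] ['x'] fuel l acc
      = acc.reverse ++ l.map (fun c => if c = '_' then 'x' else c) := by
  induction l generalizing acc fuel with
  | nil => cases fuel <;> simp [PySem.Chars.replace.go]
  | cons c t ih =>
    cases fuel with
    | zero => simp at h
    | succ f =>
      by_cases hc : c = '_'
      · subst hc
        have hpre : List.isPrefixOf ['_'] ('_' :: t) = true := by simp [List.isPrefixOf]
        simp only [PySem.Chars.replace.go, hpre, if_pos]
        simpa using ih ('x' :: acc) f (by simpa using h)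
      · have hpre : List.isPrefixOf ['_'] (c :: t) = false := by
          have hb : ('_' == c) = false := by
            simp only [beq_eq_false_iff_ne, ne_eq]
            exact fun he => hc he.symm
          simp [List.isPrefixOf, hb]
        simp only [PySem.Chars.replace.go, hpre, Bool.false_eq_true, if_false]
        rw [ih (c :: acc) f (by simpa using h)]
        simp [hc]

theorem pv_replace_map (l : List Char) :
    PySem.Chars.replace l ['_'] ['x'] = l.map (fun c => if c = '_' then 'x' else c) := by
  simp [PySem.Chars.replace, pv_replace_go_map l [] l.length (le_refl _)]

theorem pv_alnum_char (c : Char) :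
    PySem.Chars.isalnum (if c = '_' then 'x' else c) = (PySem.Chars.isalnum c || c == '_') := by
  by_cases hc : c = '_'
  · subst hc; decide
  · rw [if_neg hc]
    have hb : (c == '_') = false := by
      simp only [beq_eq_false_iff_ne, ne_eq]; exact hc
    rw [hb, Bool.or_false]

theorem pv_halnum (t : String) :
    PySem.Str.strIsalnum (PySem.Str.replace t "_" "x")
      = (!t.toList.isEmpty && t.toList.all (fun c => PySem.Chars.isalnum c || c == '_')) := by
  rw [PySem.Str.strIsalnum_eq, PySem.Str.toList_replace]
  have h1 : ("_" : String).toList = ['_'] := rfl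
  have h2 : ("x" : String).toList = ['x'] := rfl
  rw [h1, h2, pv_replace_map, PySem.Chars.strIsalnum, List.isEmpty_map, List.all_map]
  congr 2
  funext x
  simpa using pv_alnum_char x

theorem pv_map_self_iff (f : Char → Char) (l : List Char) :
    (l.map f = l) ↔ ∀ x ∈ l, f x = x := by
  induction l with
  | nil => simp
  | cons a t ih => simp [ih]

theorem pv_upperChar_eq_self_iff (c : Char) :
    (PySem.Chars.upperChar c = c) ↔ PySem.Chars.islower c = false := by
  constructor
  · intro h
    cases hx : PySem.Chars.islower c
    · rfl
    · exfalso
      have hb : 97 ≤ c.toNat ∧ c.toNat ≤ 122 := by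
        simp only [PySem.Chars.islower, Bool.and_eq_true, decide_eq_true_eq] at hx
        obtain ⟨ha, hb⟩ := hx
        rw [Char.le_def] at ha hb
        exact ⟨ha, hb⟩
      have ht : (Char.ofNat (c.toNat - 32)).toNat = c.toNat - 32 := by
        have hv : (c.toNat - 32).isValidChar := Or.inl (by omega)
        rw [Char.ofNat, dif_pos hv]
        rfl
      rw [PySem.Chars.upperChar, if_pos hx] at h
      have hco := congrArg Char.toNat h
      rw [ht] at hco
      omega
  · intro h
    simp [PySem.Chars.upperChar, h]

theorem pv_upper_self_iff (t : String) :
    (t == PySem.Str.upper t) = !(t.toList.any PySem.Chars.islower) := by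
  rw [Bool.eq_iff_iff, beq_iff_eq, Bool.not_eq_true', List.any_eq_false]
  constructor
  · intro he c hc
    have h2 := congrArg String.toList he
    rw [PySem.Str.toList_upper, PySem.Chars.upper] at h2
    have hf := (pv_upperChar_eq_self_iff c).mp ((pv_map_self_iff _ _).mp h2.symm c hc)
    simp [hf]
  · intro hall
    apply String.toList_injective
    rw [PySem.Str.toList_upper, PySem.Chars.upper]
    symm
    apply (pv_map_self_iff _ _).mpr
    intro x hx
    apply (pv_upperChar_eq_self_iff x).mpr
    cases hxx : PySem.Chars.islower x
    · rfl
    · exact absurd hxx (hall x hx)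

theorem pv_endingsLoop_eq (t : String) :
    pvEndingsLoop t pvReservedEndings = !(pvReservedEndings.any (fun e => PySem.Str.endswith t e)) := by
  cases hA : PySem.Str.endswith t "Error" <;> cases hB : PySem.Str.endswith t "Exit" <;>
    cases hC : PySem.Str.endswith t "Exception" <;>
      simp [pvEndingsLoop, pvReservedEndings, hA, hB, hC]

theorem pv_endswith_of_toList {t : String} {u : List Char}
    (h : u ++ ("Array" : String).toList = t.toList) : PySem.Str.endswith t "Array" = true := by
  rw [PySem.Str.endswith_eq]
  exact (PySem.Chars.endswith_iff _ _).mpr ⟨u, h⟩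

theorem pv_strip_decomp (t : String) (h : PySem.Str.endswith t "Array" = true) :
    t.toList = (PySem.Str.slice t none (some (-5))).toList ++ ("Array" : String).toList := by
  have hs : ("Array" : String).toList <:+ t.toList :=
    (PySem.Chars.endswith_iff _ _).mp (by rw [← PySem.Str.endswith_eq]; exact h)
  obtain ⟨u, hu⟩ := hs
  have hlen : t.toList.length = u.length + 5 := by rw [← hu]; simp
  have hst : (PySem.Str.slice t none (some (-5))).toList = u := by
    rw [PySem.Str.toList_slice, PySem.Chars.slice_eq_listSlice,
        PySem.List.slice_to_neg_ofNat t.toList 5 (by omega), hlen, ← hu]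
    simp
  rw [hst, hu]

theorem pv_E3_iff (t : String) :
    PySem.Str.endswith t "ArrayArrayArray" = true ↔
      (PySem.Str.endswith t "Array" = true ∧
       PySem.Str.endswith (PySem.Str.slice t none (some (-5))) "Array" = true ∧
       PySem.Str.endswith
         (PySem.Str.slice (PySem.Str.slice t none (some (-5))) none (some (-5))) "Array" = true) := by
  have hA : ("ArrayArrayArray" : String).toList
      = ("Array" : String).toList ++ ("Array" : String).toList ++ ("Array" : String).toList := rfl
  constructor
  · intro h
    have hs : ("ArrayArrayArray" : String).toList <:+ t.toList :=
      (PySem.Chars.endswith_iff _ _).mp (by rw [← PySem.Str.endswith_eq]; exact h)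
    obtain ⟨u, hu⟩ := hs
    rw [hA] at hu
    have h1 : PySem.Str.endswith t "Array" = true :=
      pv_endswith_of_toList (u := u ++ ("Array" : String).toList ++ ("Array" : String).toList)
        (by rw [← hu]; simp [List.append_assoc])
    have hd1 := pv_strip_decomp t h1
    have he1 : (PySem.Str.slice t none (some (-5))).toList
        = u ++ ("Array" : String).toList ++ ("Array" : String).toList := by
      apply List.append_cancel_right (bs := ("Array" : String).toList)
      rw [← hd1, ← hu]
      simp [List.append_assoc]
    have h2 : PySem.Str.endswith (PySem.Str.slice t none (some (-5))) "Array" = true :=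
      pv_endswith_of_toList (u := u ++ ("Array" : String).toList) he1.symm
    have hd2 := pv_strip_decomp _ h2
    have he2 : (PySem.Str.slice (PySem.Str.slice t none (some (-5))) none (some (-5))).toList
        = u ++ ("Array" : String).toList := by
      apply List.append_cancel_right (bs := ("Array" : String).toList)
      rw [← hd2, he1]
    have h3 := pv_endswith_of_toList he2.symm
    exact ⟨h1, h2, h3⟩
  · rintro ⟨h1, h2, h3⟩
    have hd1 := pv_strip_decomp t h1
    have hd2 := pv_strip_decomp _ h2
    have hd3 := pv_strip_decomp _ h3
    rw [PySem.Str.endswith_eq]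
    apply (PySem.Chars.endswith_iff _ _).mpr
    refine ⟨(PySem.Str.slice (PySem.Str.slice (PySem.Str.slice t none (some (-5))) none (some (-5)))
              none (some (-5))).toList, ?_⟩
    rw [hA, hd1, hd2, hd3]
    simp [List.append_assoc]

theorem pvStripLoop_pos {s : String} {d : Nat} (h : PySem.Str.endswith s "Array" = true) :
    pvStripLoop s d = pvStripLoop (PySem.Str.slice s none (some (-5))) (d + 1) := by
  rw [pvStripLoop, dif_pos h]

theorem pvStripLoop_neg {s : String} {d : Nat} (h : PySem.Str.endswith s "Array" = false) :
    pvStripLoop s d = (s, d) := by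
  rw [pvStripLoop, dif_neg (by simp only [h, Bool.false_eq_true]; exact not_false)]

theorem pvStripLoop_snd_ge (s : String) (d : Nat) : d ≤ (pvStripLoop s d).2 := by
  have H : ∀ n (s : String), s.toList.length ≤ n → ∀ d, d ≤ (pvStripLoop s d).2 := by
    intro n
    induction n with
    | zero =>
      intro s hs d
      have hx : PySem.Str.endswith s "Array" = false := by
        cases hx : PySem.Str.endswith s "Array"
        · rfl
        · exfalso
          have h5 := ((PySem.Chars.endswith_iff _ _).mp
            (by rw [← PySem.Str.endswith_eq]; exact hx)).length_le
          have hA5 : ("Array" : String).toList.length = 5 := rfl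
          omega
      rw [pvStripLoop_neg hx]
    | succ n ih =>
      intro s hs d
      cases hx : PySem.Str.endswith s "Array"
      · rw [pvStripLoop_neg hx]
      · rw [pvStripLoop_pos hx]
        have h5 : 5 ≤ s.toList.length := by
          have := ((PySem.Chars.endswith_iff _ _).mp
            (by rw [← PySem.Str.endswith_eq]; exact hx)).length_le
          simpa using this
        have hlt : (PySem.Str.slice s none (some (-5))).toList.length ≤ n := by
          rw [PySem.Str.toList_slice, PySem.Chars.slice_eq_listSlice,
              PySem.List.slice_to_neg_ofNat s.toList 5 (by omega), List.length_take]
          simp only [String.length_toList] at hs h5 ⊢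
          omega
        exact le_trans (Nat.le_succ d) (ih _ hlt (d + 1))
  exact H s.toList.length s le_rfl d

theorem pv_validAgree (t : String) (hE : PySem.Str.endswith t "Array" = false) :
    pv_is_valid_spydertype t = is_valid_spydertype2_alt t := by
  have hE3 : PySem.Str.endswith t "ArrayArrayArray" = false :=
    Bool.eq_false_iff.mpr (fun hx => by
      have h1 := ((pv_E3_iff t).mp hx).1
      rw [h1] at hE
      exact Bool.noConfusion hE)
  unfold is_valid_spydertype2_alt pv_is_valid_spydertype
  rw [pv_halnum]
  simp only [hE3, hE, Bool.false_eq_true, if_false]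
  rw [pv_upper_self_iff t, pv_endingsLoop_eq]
  cases hl : t.toList with
  | nil => simp [hl, PySem.Str.len_eq]
  | cons c rest =>
    have hget : PySem.Str.pyGet? t 0 = some c := by
      rw [PySem.Str.pyGet?_eq, PySem.Chars.pyGet?_eq_listPyGet?, hl]
      simp [PySem.List.pyGet?, PySem.List.pyIdx?]
    have hlen0 : ¬ (PySem.Str.len t = 0) := by
      rw [PySem.Str.len_eq, hl, List.length_cons]
      push_cast
      omega
    rw [hget]
    simp only [List.isEmpty_cons, Bool.not_false, Bool.true_and]
    rw [if_neg hlen0]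
    by_cases hall : (c :: rest).all (fun x => PySem.Chars.isalnum x || x == '_') = true
    · have hany : (c :: rest).any (fun x => !(PySem.Chars.isalnum x || x == '_')) = false := by
        rw [List.any_eq_false]
        intro x hx
        have hgx := (List.all_eq_true.mp hall) x hx
        simp [hgx]
      simp only [hall, Bool.not_true, Bool.false_eq_true, if_false, hany, Bool.false_or]
    · have hall' : (c :: rest).all (fun x => PySem.Chars.isalnum x || x == '_') = false :=
        Bool.eq_false_iff.mpr hall
      have hany : (c :: rest).any (fun x => !(PySem.Chars.isalnum x || x == '_')) = true := by
        rw [List.any_eq_true]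
        rcases List.all_eq_false.mp hall' with ⟨x, hx, hpx⟩
        exact ⟨x, hx, by simp [Bool.eq_false_iff.mpr hpx]⟩
      simp only [hall', hany, Bool.not_false, eq_self_iff_true, if_true]

theorem pv_alt_strip (t : String) (h1 : PySem.Str.endswith t "Array" = true)
    (hE3 : PySem.Str.endswith t "ArrayArrayArray" = false) :
    is_valid_spydertype2_alt t = is_valid_spydertype2_alt (PySem.Str.slice t none (some (-5))) := by
  have hE3S : PySem.Str.endswith (PySem.Str.slice t none (some (-5))) "ArrayArrayArray" = false := by
    apply Bool.eq_false_iff.mpr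
    intro hx
    obtain ⟨e1, e2, _⟩ := (pv_E3_iff _).mp hx
    have hc : PySem.Str.endswith t "ArrayArrayArray" = true := (pv_E3_iff t).mpr ⟨h1, e1, e2⟩
    rw [hc] at hE3
    exact Bool.noConfusion hE3
  by_cases hs2 : PySem.Str.endswith (PySem.Str.slice t none (some (-5))) "Array" = true
  · have hs3 : PySem.Str.endswith
        (PySem.Str.slice (PySem.Str.slice t none (some (-5))) none (some (-5))) "Array" = false := by
      apply Bool.eq_false_iff.mpr
      intro hx
      have hc : PySem.Str.endswith t "ArrayArrayArray" = true := (pv_E3_iff t).mpr ⟨h1, hs2, hx⟩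
      rw [hc] at hE3
      exact Bool.noConfusion hE3
    simp only [is_valid_spydertype2_alt, hE3, hE3S, h1, hs2, hs3, Bool.false_eq_true,
               eq_self_iff_true, if_true, if_false]
  · have hs2' : PySem.Str.endswith (PySem.Str.slice t none (some (-5))) "Array" = false :=
      Bool.eq_false_iff.mpr hs2
    simp only [is_valid_spydertype2_alt, hE3, hE3S, h1, hs2', Bool.false_eq_true,
               eq_self_iff_true, if_true, if_false]

-- ===== VERDICT (by name: the statement is the Claim_ definition above) =====
theorem is_valid_spydertype2_spec : Claim_equal_is_valid_spydertype2 := by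
  intro t _
  unfold Spec_is_valid_spydertype2
  by_cases h1 : PySem.Str.endswith t "Array" = true
  · by_cases h2 : PySem.Str.endswith (PySem.Str.slice t none (some (-5))) "Array" = true
    · by_cases h3 : PySem.Str.endswith
          (PySem.Str.slice (PySem.Str.slice t none (some (-5))) none (some (-5))) "Array" = true
      · have hE3 : PySem.Str.endswith t "ArrayArrayArray" = true := (pv_E3_iff t).mpr ⟨h1, h2, h3⟩
        have hd : 2 < (pvStripLoop t 0).2 := by
          rw [pvStripLoop_pos h1, pvStripLoop_pos h2, pvStripLoop_pos h3]
          exact lt_of_lt_of_le (by omega) (pvStripLoop_snd_ge _ 3)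
        unfold is_valid_spydertype2 is_valid_spydertype2_alt
        rw [if_pos hd, if_pos hE3]
      · have h3' : PySem.Str.endswith
            (PySem.Str.slice (PySem.Str.slice t none (some (-5))) none (some (-5))) "Array" = false :=
          Bool.eq_false_iff.mpr h3
        have hE3 : PySem.Str.endswith t "ArrayArrayArray" = false :=
          Bool.eq_false_iff.mpr (fun hx => h3 ((pv_E3_iff t).mp hx).2.2)
        have hE3S : PySem.Str.endswith (PySem.Str.slice t none (some (-5))) "ArrayArrayArray" = false :=
          Bool.eq_false_iff.mpr (fun hx => h3 ((pv_E3_iff (PySem.Str.slice t none (some (-5)))).mp hx).2.1)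
        have hA : pvStripLoop t 0
            = (PySem.Str.slice (PySem.Str.slice t none (some (-5))) none (some (-5)), 2) := by
          rw [pvStripLoop_pos h1, pvStripLoop_pos h2, pvStripLoop_neg h3']
        unfold is_valid_spydertype2
        rw [hA]
        norm_num
        rw [pv_validAgree _ h3', ← pv_alt_strip (PySem.Str.slice t none (some (-5))) h2 hE3S,
            ← pv_alt_strip t h1 hE3]
    · have h2' : PySem.Str.endswith (PySem.Str.slice t none (some (-5))) "Array" = false :=
        Bool.eq_false_iff.mpr h2
      have hE3 : PySem.Str.endswith t "ArrayArrayArray" = false :=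
        Bool.eq_false_iff.mpr (fun hx => h2 ((pv_E3_iff t).mp hx).2.1)
      have hA : pvStripLoop t 0 = (PySem.Str.slice t none (some (-5)), 1) := by
        rw [pvStripLoop_pos h1, pvStripLoop_neg h2']
      unfold is_valid_spydertype2
      rw [hA]
      norm_num
      rw [pv_validAgree _ h2', ← pv_alt_strip t h1 hE3]
  · have h1' : PySem.Str.endswith t "Array" = false := Bool.eq_false_iff.mpr h1
    have hA : pvStripLoop t 0 = (t, 0) := pvStripLoop_neg h1'
    unfold is_valid_spydertype2
    rw [hA]
    norm_num
    exact pv_validAgree t h1'
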